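-- pv_equiv track=rewrite | github.com/fahmadiqbal1/FHIR-DICOM-With-Med-Gemma | src/dicom/validator.py | _validate_uid_format
-- ===== SOURCE A (Python) =====
-- def _validate_uid_format(uid: str) -> bool:
--     """Validate DICOM UID format"""
--     if not uid:
--         return False
--
--     # UID should contain only digits and dots
--     if not all(c.isdigit() or c == '.' for c in uid):
--         return False
--
--     # Should not start or end with dot
--     if uid.startswith('.') or uid.endswith('.'):
--         return False
--
--     # Should not have consecutive dots
--     if '..' in uid:
--         return False
--
--     # Should have reasonable length
--     if len(uid) > 64:
--         return False
--
--     return True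
-- ===== SOURCE B (Python) =====
-- def _validate_uid_format(uid: str) -> bool:
--     """Validate DICOM UID format (tokenize on '.' instead of scanning for each rule)"""
--     if not uid:
--         return False
--     if len(uid) > 64:
--         return False
--     return all(p.isdigit() for p in uid.split('.'))
-- ===== Notes on version B (the rewrite author's own statement) =====
-- stated objective: simpler
-- what changed: B splits the UID into its dot-separated components and checks every component with str.isdigit(), replacing A's four separate whole-string scans (character class, leading/trailing dot, consecutive-dot substring); empty components from stray dots fail isdigit automatically.
import Mathlib
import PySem

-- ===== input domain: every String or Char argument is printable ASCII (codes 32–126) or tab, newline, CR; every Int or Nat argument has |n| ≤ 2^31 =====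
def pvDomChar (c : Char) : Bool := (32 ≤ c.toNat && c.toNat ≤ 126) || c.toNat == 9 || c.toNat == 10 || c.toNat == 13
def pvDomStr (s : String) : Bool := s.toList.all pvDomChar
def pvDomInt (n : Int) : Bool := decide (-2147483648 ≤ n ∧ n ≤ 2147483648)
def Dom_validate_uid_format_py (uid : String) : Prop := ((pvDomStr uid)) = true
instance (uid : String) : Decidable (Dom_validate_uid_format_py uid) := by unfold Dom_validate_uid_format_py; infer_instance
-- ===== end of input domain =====

-- B tokenizes the UID on '.' and checks each component with str.isdigit(), replacing A's four separate whole-string scans; same return value.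


-- ===== PORT A =====
def validate_uid_format_py (uid : String) : Bool :=
  if uid.toList.isEmpty then false
  else if !(uid.toList.all (fun c => PySem.Chars.isdigit c || c == '.')) then false
  else if PySem.Str.startswith uid "." || PySem.Str.endswith uid "." then false
  else if PySem.Str.isIn ".." uid then false
  else if 64 < PySem.Str.len uid then false
  else true

-- ===== PORT B =====
def validate_uid_format_py_alt (uid : String) : Bool :=
  if uid.toList.isEmpty then false
  else if 64 < PySem.Str.len uid then false
  else ((PySem.Str.split? uid ".").getD []).all PySem.Str.strIsdigit

-- ===== PRECONDITION & SPEC =====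
def Spec_validate_uid_format_py (uid : String) (out : Bool) : Prop := out = validate_uid_format_py_alt uid
instance (uid : String) (out : Bool) : Decidable (Spec_validate_uid_format_py uid out) := by unfold Spec_validate_uid_format_py; infer_instance

-- ===== CLAIM (what is proved, stated in full; the proofs are below) =====
def Claim_equal_validate_uid_format_py : Prop := ∀ (uid : String), Dom_validate_uid_format_py uid → Spec_validate_uid_format_py uid (validate_uid_format_py uid)

-- ===== LEMMAS AND PROOFS =====

/-- Reference single-char split used only by the proofs. -/
def mySplit : List Char → List Char → List (List Char)
  | [], cur => [cur.reverse]
  | c :: rest, cur => if c == '.' then cur.reverse :: mySplit rest [] else mySplit rest (c :: cur)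

/-- digit+('.'digit+)* automaton; state = "current component already has a digit". -/
def good1 (s : Bool) : List Char → Bool
  | [] => s
  | c :: rest => if c == '.' then s && good1 false rest else (PySem.Chars.isdigit c && good1 true rest)

theorem go_cons (n : Nat) (c : Char) (rest cur : List Char) (acc : List (List Char)) :
    PySem.Chars.splitOn.go ['.'] (n+1) (c :: rest) cur acc =
      if c = '.' then PySem.Chars.splitOn.go ['.'] n rest [] (cur.reverse :: acc)
      else PySem.Chars.splitOn.go ['.'] n rest (c :: cur) acc := by
  by_cases hc : c = '.'
  · subst hc
    rw [if_pos rfl]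
    simp [PySem.Chars.splitOn.go, List.isPrefixOf]
  · have h1 : (List.isPrefixOf ['.'] (c :: rest)) = false := by
      simp [List.isPrefixOf, Ne.symm hc]
    rw [if_neg hc]
    simp [PySem.Chars.splitOn.go, h1]

theorem go_eq (fuel : Nat) (cs cur : List Char) (acc : List (List Char)) (h : cs.length ≤ fuel) :
    PySem.Chars.splitOn.go ['.'] fuel cs cur acc = acc.reverse ++ mySplit cs cur := by
  induction fuel generalizing cs cur acc with
  | zero =>
    cases cs with
    | nil => simp [PySem.Chars.splitOn.go, mySplit]
    | cons c rest => simp at h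
  | succ n ih =>
    cases cs with
    | nil => simp [PySem.Chars.splitOn.go, mySplit]
    | cons c rest =>
      simp only [List.length_cons, Nat.succ_le_succ_iff] at h
      rw [go_cons]
      by_cases hc : c = '.'
      · rw [if_pos hc, ih rest [] (cur.reverse :: acc) h]
        simp [mySplit, hc]
      · rw [if_neg hc, ih rest (c :: cur) acc h]
        simp [mySplit, hc]

theorem splitOn_eq_mySplit (cs : List Char) :
    PySem.Chars.splitOn cs ['.'] = mySplit cs [] := by
  unfold PySem.Chars.splitOn
  rw [go_eq (cs.length + 1) cs [] [] (by omega)]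
  simp

theorem mySplit_poison (cs cur : List Char) (h : cur.all PySem.Chars.isdigit = false) :
    (mySplit cs cur).all PySem.Chars.strIsdigit = false := by
  induction cs generalizing cur with
  | nil =>
    simp [mySplit, PySem.Chars.strIsdigit, List.all_reverse, h]
  | cons c rest ih =>
    by_cases hc : c = '.'
    · subst hc
      simp [mySplit, PySem.Chars.strIsdigit, List.all_reverse, h]
    · have hcb : (c == '.') = false := by simpa using hc
      simp only [mySplit, hcb, Bool.false_eq_true, if_false]
      exact ih (c :: cur) (by simp [h])

theorem mySplit_good (cs cur : List Char) (h : cur.all PySem.Chars.isdigit = true) :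
    (mySplit cs cur).all PySem.Chars.strIsdigit = good1 (!cur.isEmpty) cs := by
  induction cs generalizing cur with
  | nil => simp [mySplit, good1, PySem.Chars.strIsdigit, h]
  | cons c rest ih =>
    by_cases hc : c = '.'
    · subst hc
      simp only [mySplit, good1, beq_self_eq_true, if_true, List.all_cons]
      rw [ih [] rfl]
      simp [PySem.Chars.strIsdigit, List.all_reverse, h]
    · have hcb : (c == '.') = false := by simpa using hc
      simp only [mySplit, good1, hcb, Bool.false_eq_true, if_false]
      by_cases hd : PySem.Chars.isdigit c = true
      · rw [ih (c :: cur) (by simp [hd, h])]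
        simp [hd]
      · simp only [Bool.not_eq_true] at hd
        rw [mySplit_poison rest (c :: cur) (by simp [hd])]
        simp [hd]

def AllP (cs : List Char) : Prop := ∀ c ∈ cs, (PySem.Chars.isdigit c || c == '.') = true

theorem good1_iff (cs : List Char) :
    (good1 true cs = true ↔ AllP cs ∧ ¬ (['.'] <:+ cs) ∧ ¬ (['.', '.'] <:+: cs)) ∧
    (good1 false cs = true ↔ AllP cs ∧ ¬ (['.'] <:+ cs) ∧ ¬ (['.', '.'] <:+: cs) ∧ cs ≠ [] ∧ ¬ (['.'] <+: cs)) := by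
  induction cs with
  | nil => simp [good1, AllP]
  | cons c rest ih =>
    obtain ⟨iht, ihf⟩ := ih
    have hsuf : (['.'] <:+ c :: rest) ↔ (['.'] = c :: rest ∨ ['.'] <:+ rest) :=
      List.suffix_cons_iff
    have hinf : (['.', '.'] <:+: c :: rest) ↔ (['.', '.'] <+: c :: rest ∨ ['.', '.'] <:+: rest) :=
      List.infix_cons_iff
    by_cases hc : c = '.'
    · subst hc
      have gt : good1 true ('.' :: rest) = good1 false rest := by simp [good1]
      have gf : good1 false ('.' :: rest) = false := by simp [good1]
      constructor
      · rw [gt, ihf]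
        constructor
        · rintro ⟨h1, h2, h3, h4, h5⟩
          refine ⟨?_, ?_, ?_⟩
          · intro x hx
            rcases List.mem_cons.mp hx with h | h
            · simp [h]
            · exact h1 x h
          · rw [hsuf]
            rintro (h | h)
            · exact h4 (by simpa using h.symm)
            · exact h2 h
          · rw [hinf]
            rintro (h | h)
            · exact h5 (List.cons_prefix_cons.mp h).2
            · exact h3 h
        · rintro ⟨h1, h2, h3⟩
          have hne : rest ≠ [] := by
            rintro rfl
            exact h2 (by simp)
          refine ⟨fun x hx => h1 x (List.mem_cons_of_mem _ hx), ?_, ?_, hne, ?_⟩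
          · intro h; exact h2 (hsuf.mpr (Or.inr h))
          · intro h; exact h3 (hinf.mpr (Or.inr h))
          · intro h
            exact h3 (hinf.mpr (Or.inl (List.cons_prefix_cons.mpr ⟨rfl, h⟩)))
      · rw [gf]
        constructor
        · intro h; exact absurd h (by simp)
        · rintro ⟨-, -, -, -, h5⟩
          exact absurd ⟨rest, rfl⟩ h5
    · have hcb : (c == '.') = false := by simpa using hc
      have gt : good1 true (c :: rest) = (PySem.Chars.isdigit c && good1 true rest) := by
        simp [good1, hcb]
      have gf : good1 false (c :: rest) = (PySem.Chars.isdigit c && good1 true rest) := by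
        simp [good1, hcb]
      have hpre : ¬ (['.'] <+: c :: rest) := by
        intro h; exact hc (List.cons_prefix_cons.mp h).1.symm
      have hpre2 : ¬ (['.', '.'] <+: c :: rest) := by
        intro h; exact hc (List.cons_prefix_cons.mp h).1.symm
      have hsuf' : (['.'] <:+ c :: rest) ↔ (['.'] <:+ rest) := by
        rw [hsuf]
        constructor
        · rintro (h | h)
          · exact absurd h.symm (by intro h2; exact hc (by injection h2))
          · exact h
        · exact Or.inr
      have hinf' : (['.', '.'] <:+: c :: rest) ↔ (['.', '.'] <:+: rest) := by
        rw [hinf]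
        constructor
        · rintro (h | h)
          · exact absurd h hpre2
          · exact h
        · exact Or.inr
      have hallP : AllP (c :: rest) ↔ (PySem.Chars.isdigit c = true ∧ AllP rest) := by
        constructor
        · intro h
          have := h c (List.mem_cons_self)
          simp [hcb] at this
          exact ⟨this, fun x hx => h x (List.mem_cons_of_mem _ hx)⟩
        · rintro ⟨h1, h2⟩ x hx
          rcases List.mem_cons.mp hx with h | h
          · simp [h, h1]
          · exact h2 x h
      have key : (PySem.Chars.isdigit c && good1 true rest) = true ↔
          (AllP (c :: rest) ∧ ¬ (['.'] <:+ c :: rest) ∧ ¬ (['.', '.'] <:+: c :: rest)) := by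
        rw [Bool.and_eq_true, iht, hallP, hsuf', hinf']
        constructor
        · rintro ⟨hd, hA, hs, hi⟩
          exact ⟨⟨hd, hA⟩, hs, hi⟩
        · rintro ⟨⟨hd, hA⟩, hs, hi⟩
          exact ⟨hd, hA, hs, hi⟩
      refine ⟨by rw [gt]; exact key, ?_⟩
      rw [gf, key]
      constructor
      · rintro ⟨h1, h2, h3⟩
        exact ⟨h1, h2, h3, by simp, hpre⟩
      · rintro ⟨h1, h2, h3, -, -⟩
        exact ⟨h1, h2, h3⟩

theorem main_list (cs : List Char) (hne : cs ≠ []) :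
    ((cs.all (fun c => PySem.Chars.isdigit c || c == '.') &&
      !(PySem.Chars.startswith cs ['.'] || PySem.Chars.endswith cs ['.']) &&
      !(PySem.Chars.isIn ['.', '.'] cs))
     = (PySem.Chars.splitOn cs ['.']).all PySem.Chars.strIsdigit) := by
  rw [splitOn_eq_mySplit]
  have h1 := mySplit_good cs [] rfl
  rw [h1, show (!(([] : List Char).isEmpty)) = false from rfl]
  rw [Bool.eq_iff_iff, (good1_iff cs).2]
  simp only [Bool.and_eq_true, Bool.not_eq_true', Bool.or_eq_false_iff, List.all_eq_true]
  constructor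
  · rintro ⟨⟨h1, h2, h3⟩, h4⟩
    refine ⟨h1, ?_, ?_, hne, ?_⟩
    · intro h
      rw [← PySem.Chars.endswith_iff] at h
      simp [h] at h3
    · intro h
      rw [← PySem.Chars.isIn_iff_infix] at h
      simp [h] at h4
    · intro h
      rw [← PySem.Chars.startswith_iff] at h
      simp [h] at h2
  · rintro ⟨h1, h2, h3, -, h5⟩
    refine ⟨⟨h1, ?_, ?_⟩, ?_⟩
    · rw [← Bool.not_eq_true, PySem.Chars.startswith_iff]; exact h5
    · rw [← Bool.not_eq_true, PySem.Chars.endswith_iff]; exact h2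
    · rw [← Bool.not_eq_true, PySem.Chars.isIn_iff_infix]; exact h3

-- ===== VERDICT (by name: the statement is the Claim_ definition above) =====
theorem validate_uid_format_py_spec : Claim_equal_validate_uid_format_py := by
  intro uid _
  unfold Spec_validate_uid_format_py validate_uid_format_py validate_uid_format_py_alt
  have hsplit : PySem.Str.split? uid "." = some ((PySem.Chars.splitOn uid.toList ['.']).map (fun l => String.ofList l)) := by
    have h := PySem.Str.split?_map uid "."
    rw [show (".".toList) = ['.'] from rfl] at h
    rw [show PySem.Chars.split? uid.toList ['.'] = some (PySem.Chars.splitOn uid.toList ['.']) from rfl] at h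
    cases he : PySem.Str.split? uid "." with
    | none => rw [he] at h; simp at h
    | some parts =>
      rw [he] at h
      simp only [Option.map_some, Option.some.injEq] at h
      congr 1
      rw [← h]
      simp only [List.map_map]
      conv_lhs => rw [← List.map_id parts]
      exact List.map_congr_left (fun a _ => by simp [Function.comp])
  rw [hsplit]
  simp only [Option.getD_some, List.all_map]
  have hsd : ((fun p => PySem.Str.strIsdigit p) ∘ (fun l => String.ofList l)) = PySem.Chars.strIsdigit := by
    funext l
    simp [Function.comp, PySem.Str.strIsdigit_eq]
  by_cases he : uid.toList.isEmpty
  · simp [he]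
  · simp only [he, Bool.false_eq_true, if_false]
    by_cases hl : 64 < PySem.Str.len uid
    · simp only [hl, if_true]
      by_cases h2 : (uid.toList.all (fun c => PySem.Chars.isdigit c || c == '.')) = true
      · simp [h2]
      · simp [h2]
    · simp only [hl, if_false]
      have hne : uid.toList ≠ [] := by simpa using he
      have hmain := main_list uid.toList hne
      rw [show (PySem.Str.strIsdigit ∘ (fun l => String.ofList l)) = PySem.Chars.strIsdigit from hsd]
      rw [← hmain]
      have hsw : PySem.Str.startswith uid "." = PySem.Chars.startswith uid.toList ['.'] := by
        simp
      have hew : PySem.Str.endswith uid "." = PySem.Chars.endswith uid.toList ['.'] := by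
        simp
      have hin : PySem.Str.isIn ".." uid = PySem.Chars.isIn ['.', '.'] uid.toList := by
        simp
      rw [hsw, hew, hin]
      by_cases h2 : (uid.toList.all (fun c => PySem.Chars.isdigit c || c == '.')) = true
      · by_cases h3 : (PySem.Chars.startswith uid.toList ['.'] || PySem.Chars.endswith uid.toList ['.']) = true
        · simp [h2, h3]
        · by_cases h4 : PySem.Chars.isIn ['.', '.'] uid.toList = true
          · simp [h2, h3, h4]
          · simp [h2, h3, h4]
      · simp [h2]
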